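-- pv_equiv track=rewrite | github.com/DanielaNovoa15/METRISK | FuntionsLibrary.py | agrupar_pisos
-- ===== SOURCE A (Python) =====
-- def agrupar_pisos(lista_pisos):
--     # Grupos definidos
--     grupos = [
--         (1, [1]),             # Edificios de 1 piso
--         (2, [2]),             # Edificios de 2 pisos
--         (3, [3, 4]),          # Edificios de 3 y 4 pisos
--         (4, range(5, 8)),     # Edificios de 5 a 7 pisos
--         (5, range(8, 11))     # Edificios de 8 a 10 pisos
--     ]
--
--     # Diccionario para almacenar los grupos
--     grupos_pisos = {grupo: [] for grupo, _ in grupos}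
--     grupos_pisos[6] = []  # Grupo para edificios de más de 10 pisos
--
--     # Asignar cada piso a su grupo correspondiente
--     for piso in lista_pisos:
--         asignado = False
--         for grupo, rango in grupos:
--             if piso in rango:
--                 grupos_pisos[grupo].append(piso)
--                 asignado = True
--                 break
--         if not asignado:
--             grupos_pisos[6].append(piso)  # Añadir a 'más de 10'
--
--     # Crear las listas finales
--     lista_pisos_agrupados = [grupos_pisos[grupo] for grupo, _ in grupos if grupos_pisos[grupo]]
--     if grupos_pisos[6]:
--         lista_pisos_agrupados.append(grupos_pisos[6])
--     lista_nombre_pisos = ['un piso', 'dos pisos', '3 y 4 pisos', '5 a 7 pisos', '8 a 10 pisos', '12 y 17 pisos']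
--
--     return lista_pisos_agrupados, lista_nombre_pisos
-- ===== SOURCE B (Python) =====
-- def agrupar_pisos(lista_pisos):
--     # No buckets/dict: classify arithmetically, then build each group's list by
--     # a separate filter pass over the input, keeping the non-empty groups in order.
--     def grupo_de(p):
--         if p == 1:
--             return 1
--         if p == 2:
--             return 2
--         if 3 <= p <= 4:
--             return 3
--         if 5 <= p <= 7:
--             return 4
--         if 8 <= p <= 10:
--             return 5
--         return 6
--     grouped = [[p for p in lista_pisos if grupo_de(p) == g] for g in range(1, 7)]
--     lista_pisos_agrupados = [b for b in grouped if b]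
--     lista_nombre_pisos = ['un piso', 'dos pisos', '3 y 4 pisos', '5 a 7 pisos', '8 a 10 pisos', '12 y 17 pisos']
--     return lista_pisos_agrupados, lista_nombre_pisos
-- ===== Notes on version B (the rewrite author's own statement) =====
-- stated objective: alternative
-- what changed: Replaced A's single bucketing pass (dict of accumulators filled via an inner scan over the group-definition table with membership tests and a break) by a bucket-free staged design: a comparison-chain classifier and one independent filter pass over the input per group 1..6, then keeping the non-empty group lists in order.
import Mathlib
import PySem

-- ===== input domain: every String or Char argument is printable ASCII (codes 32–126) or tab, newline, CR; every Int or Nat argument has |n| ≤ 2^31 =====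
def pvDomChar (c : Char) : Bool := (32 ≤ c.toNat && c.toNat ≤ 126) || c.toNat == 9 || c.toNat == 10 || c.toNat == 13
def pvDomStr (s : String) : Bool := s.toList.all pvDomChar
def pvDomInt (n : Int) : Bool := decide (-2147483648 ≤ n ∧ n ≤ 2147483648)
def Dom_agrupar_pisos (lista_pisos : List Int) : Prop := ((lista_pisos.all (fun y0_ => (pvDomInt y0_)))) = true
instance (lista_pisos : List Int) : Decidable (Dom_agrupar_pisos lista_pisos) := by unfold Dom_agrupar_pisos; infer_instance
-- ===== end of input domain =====

-- B drops A's dict-of-buckets single pass (inner membership scan with break) in favour of a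
-- comparison-chain classifier and one independent filter pass per group (objective: alternative).

-- ===== PORT A =====
-- the 'grupos' list of A (ranges ported with PySem.List.pyRange)
def pvGrupos : List (Int × List Int) :=
  [(1, [1]), (2, [2]), (3, [3, 4]), (4, PySem.List.pyRange 5 8 1), (5, PySem.List.pyRange 8 11 1)]

-- A's inner 'for grupo, rango in grupos: if piso in rango: …append…; break'
def pvAssign (piso : Int) : List (Int × List Int) → PySem.Dict Int (List Int) → PySem.Dict Int (List Int) × Bool
  | [], d => (d, false)
  | (g, r) :: rest, d =>
      if r.contains piso then (d.modify g [] (fun v => v ++ [piso]), true)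
      else pvAssign piso rest d

def agrupar_pisos (lista_pisos : List Int) : List (List Int) × List String :=
  let grupos := pvGrupos
  let grupos_pisos0 := (grupos.foldl (fun d p => d.insert p.1 ([] : List Int)) PySem.Dict.empty).insert 6 []
  let grupos_pisos := lista_pisos.foldl
    (fun (d : PySem.Dict Int (List Int)) (piso : Int) =>
      match pvAssign piso pvGrupos d with
      | (d', true) => d'
      | (d', false) => d'.modify 6 [] (fun v => v ++ [piso])) grupos_pisos0
  let lista_pisos_agrupados := grupos.foldl
    (fun acc p => if grupos_pisos.getD p.1 [] ≠ [] then acc ++ [grupos_pisos.getD p.1 []] else acc) []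
  let lista_pisos_agrupados :=
    if grupos_pisos.getD 6 [] ≠ [] then lista_pisos_agrupados ++ [grupos_pisos.getD 6 []]
    else lista_pisos_agrupados
  (lista_pisos_agrupados, ["un piso", "dos pisos", "3 y 4 pisos", "5 a 7 pisos", "8 a 10 pisos", "12 y 17 pisos"])

-- ===== PORT B =====
-- Source B's grupo_de: comparison chain
def pvGrupoDe (p : Int) : Int :=
  if p = 1 then 1
  else if p = 2 then 2
  else if 3 ≤ p ∧ p ≤ 4 then 3
  else if 5 ≤ p ∧ p ≤ 7 then 4
  else if 8 ≤ p ∧ p ≤ 10 then 5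
  else 6

def agrupar_pisos_alt (lista_pisos : List Int) : List (List Int) × List String :=
  let grouped := (PySem.List.pyRange 1 7 1).map (fun g => lista_pisos.filter (fun p => pvGrupoDe p == g))
  let lista_pisos_agrupados := grouped.filter (fun b => !b.isEmpty)
  (lista_pisos_agrupados, ["un piso", "dos pisos", "3 y 4 pisos", "5 a 7 pisos", "8 a 10 pisos", "12 y 17 pisos"])

-- ===== PRECONDITION & SPEC =====
def Spec_agrupar_pisos (lista_pisos : List Int) (out : List (List Int) × List String) : Prop := out = agrupar_pisos_alt lista_pisos
instance (lista_pisos : List Int) (out : List (List Int) × List String) : Decidable (Spec_agrupar_pisos lista_pisos out) := by unfold Spec_agrupar_pisos; infer_instance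

-- ===== CLAIM (what is proved, stated in full; the proofs are below) =====
def Claim_equal_agrupar_pisos : Prop := ∀ (lista_pisos : List Int), Dom_agrupar_pisos lista_pisos → Spec_agrupar_pisos lista_pisos (agrupar_pisos lista_pisos)

-- ===== LEMMAS AND PROOFS =====

-- one step of A's loop is 'modify at the classifier's group', for every dict state and every piso
theorem pv_step_eq (d : PySem.Dict Int (List Int)) (piso : Int) :
    (match pvAssign piso pvGrupos d with
     | (d', true) => d'
     | (d', false) => d'.modify 6 [] (fun v => v ++ [piso]))
    = d.modify (pvGrupoDe piso) [] (fun v => v ++ [piso]) := by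
  have h58 : PySem.List.pyRange 5 8 1 = [5, 6, 7] := by decide
  have h811 : PySem.List.pyRange 8 11 1 = [8, 9, 10] := by decide
  simp only [pvGrupos, pvAssign, h58, h811, List.contains_cons, List.contains_nil, pvGrupoDe]
  by_cases h1 : piso = 1
  · subst h1; rfl
  · by_cases h2 : piso = 2
    · subst h2; rfl
    · by_cases h3 : piso = 3
      · subst h3; rfl
      · by_cases h4 : piso = 4
        · subst h4; rfl
        · by_cases h5 : piso = 5
          · subst h5; rfl
          · by_cases h6 : piso = 6
            · subst h6; rfl
            · by_cases h7 : piso = 7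
              · subst h7; rfl
              · by_cases h8 : piso = 8
                · subst h8; rfl
                · by_cases h9 : piso = 9
                  · subst h9; rfl
                  · by_cases h10 : piso = 10
                    · subst h10; rfl
                    · have c3 : ¬(3 ≤ piso ∧ piso ≤ 4) := by omega
                      have c4 : ¬(5 ≤ piso ∧ piso ≤ 7) := by omega
                      have c5 : ¬(8 ≤ piso ∧ piso ≤ 10) := by omega
                      simp [h1, h2, h3, h4, h5, h6, h7, h8, h9, h10, c3, c4, c5]

-- the bucket dict after A's loop holds, at each group, the filter B computes for that group
theorem pv_getD_eq (l : List Int) (g : Int) :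
    ((l.foldl
        (fun (d : PySem.Dict Int (List Int)) (piso : Int) =>
          d.modify (pvGrupoDe piso) [] (fun v => v ++ [piso]))
        ((pvGrupos.foldl (fun d p => d.insert p.1 ([] : List Int)) PySem.Dict.empty).insert 6 [])).getD g [])
    = (((pvGrupos.foldl (fun d p => d.insert p.1 ([] : List Int)) PySem.Dict.empty).insert 6 []).getD g [])
      ++ l.filter (fun p => pvGrupoDe p == g) := by
  have h : l.foldl
      (fun (d : PySem.Dict Int (List Int)) (piso : Int) =>
        d.modify (pvGrupoDe piso) [] (fun v => v ++ [piso]))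
      ((pvGrupos.foldl (fun d p => d.insert p.1 ([] : List Int)) PySem.Dict.empty).insert 6 [])
    = (l.map (fun p => (pvGrupoDe p, p))).foldl
      (fun (d : PySem.Dict Int (List Int)) q => d.modify q.1 [] (fun v => v ++ [q.2]))
      ((pvGrupos.foldl (fun d p => d.insert p.1 ([] : List Int)) PySem.Dict.empty).insert 6 []) := by
    rw [List.foldl_map]
  rw [h, PySem.Dict.getD_foldl_modify_append]
  congr 1
  rw [List.filter_map]
  simp [Function.comp_def]

set_option maxHeartbeats 2000000 in
theorem agrupar_pisos_eq_alt (l : List Int) : agrupar_pisos l = agrupar_pisos_alt l := by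
  have hstep : (fun (d : PySem.Dict Int (List Int)) (piso : Int) =>
      match pvAssign piso pvGrupos d with
      | (d', true) => d'
      | (d', false) => d'.modify 6 [] (fun v => v ++ [piso]))
      = (fun (d : PySem.Dict Int (List Int)) (piso : Int) =>
          d.modify (pvGrupoDe piso) [] (fun v => v ++ [piso])) :=
    funext fun d => funext fun piso => pv_step_eq d piso
  simp only [agrupar_pisos, agrupar_pisos_alt, hstep]
  have hg := pv_getD_eq l
  have h1 := hg 1; have h2 := hg 2; have h3 := hg 3
  have h4 := hg 4; have h5 := hg 5; have h6 := hg 6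
  have hd : ((pvGrupos.foldl (fun d p => d.insert p.1 ([] : List Int)) PySem.Dict.empty).insert 6 [])
      = PySem.Dict.mk [(1, []), (2, []), (3, []), (4, []), (5, []), (6, [])] := by decide
  simp only [hd] at h1 h2 h3 h4 h5 h6
  have e1 : (PySem.Dict.mk ([(1, ([] : List Int)), (2, []), (3, []), (4, []), (5, []), (6, [])] : List (Int × List Int))).getD 1 [] = [] := by decide
  have e2 : (PySem.Dict.mk ([(1, ([] : List Int)), (2, []), (3, []), (4, []), (5, []), (6, [])] : List (Int × List Int))).getD 2 [] = [] := by decide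
  have e3 : (PySem.Dict.mk ([(1, ([] : List Int)), (2, []), (3, []), (4, []), (5, []), (6, [])] : List (Int × List Int))).getD 3 [] = [] := by decide
  have e4 : (PySem.Dict.mk ([(1, ([] : List Int)), (2, []), (3, []), (4, []), (5, []), (6, [])] : List (Int × List Int))).getD 4 [] = [] := by decide
  have e5 : (PySem.Dict.mk ([(1, ([] : List Int)), (2, []), (3, []), (4, []), (5, []), (6, [])] : List (Int × List Int))).getD 5 [] = [] := by decide
  have e6 : (PySem.Dict.mk ([(1, ([] : List Int)), (2, []), (3, []), (4, []), (5, []), (6, [])] : List (Int × List Int))).getD 6 [] = [] := by decide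
  simp only [e1, e2, e3, e4, e5, e6, List.nil_append] at h1 h2 h3 h4 h5 h6
  simp only [hd]
  simp only [pvGrupos] at h1 h2 h3 h4 h5 h6 ⊢
  have hr : PySem.List.pyRange 1 7 1 = [1, 2, 3, 4, 5, 6] := by decide
  simp only [hr, List.foldl_cons, List.foldl_nil, List.map_cons, List.map_nil,
    List.filter_cons, List.filter_nil, h1, h2, h3, h4, h5, h6]
  clear hstep hg hd e1 e2 e3 e4 e5 e6 hr
  generalize l.filter (fun p => pvGrupoDe p == 1) = f1 at h1 ⊢
  generalize l.filter (fun p => pvGrupoDe p == 2) = f2 at h2 ⊢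
  generalize l.filter (fun p => pvGrupoDe p == 3) = f3 at h3 ⊢
  generalize l.filter (fun p => pvGrupoDe p == 4) = f4 at h4 ⊢
  generalize l.filter (fun p => pvGrupoDe p == 5) = f5 at h5 ⊢
  generalize l.filter (fun p => pvGrupoDe p == 6) = f6 at h6 ⊢
  clear h1 h2 h3 h4 h5 h6
  have hb : ∀ f : List Int, ((!f.isEmpty) = true) = (f ≠ []) := fun f => by cases f <;> simp
  simp only [hb]
  split_ifs <;> simp

-- ===== VERDICT (by name: the statement is the Claim_ definition above) =====
theorem agrupar_pisos_spec : Claim_equal_agrupar_pisos := by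
  intro l _
  unfold Spec_agrupar_pisos
  exact agrupar_pisos_eq_alt l
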